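-- pv_equiv track=rewrite | github.com/DuyguA/TSD2025-Mind-the-Gap | testing_scripts/rate_checkpoints.py | find_deletion_segment_start
-- ===== SOURCE A (Python) =====
-- def find_deletion_segment_start(hypo, threshold=30):
--     # Initialize counters
--     count = 0
--     start_index = -1
--
--     # Iterate through the sequence
--     for i, char in enumerate(hypo):
--         if char == '*':
--             if count == 0:
--                 start_index = i  # Mark the start of the segment
--             count += 1
--             # If the consecutive '*' count reaches the threshold, return the start index
--             if count >= threshold:
--                 return start_index
--         else:
--             # Reset the count when a non-'*' character is encountered
--             count = 0
--             start_index = -1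
--
--     # If no segment is found, return -1
--     return -1
-- ===== SOURCE B (Python) =====
-- import re
--
-- def find_deletion_segment_start(hypo, threshold=30):
--     # A run of fewer than 1 star can never trigger before the first '*',
--     # so any threshold <= 1 behaves like threshold 1.
--     m = re.search(r'\*{%d,}' % max(threshold, 1), hypo)
--     return m.start() if m else -1
-- ===== Notes on version B (the rewrite author's own statement) =====
-- stated objective: idiomatic
-- what changed: Replaced the manual enumerate loop with counter/start-index state by a single regex search for a run of at least max(threshold,1) asterisks, returning the match start or -1.
import Mathlib
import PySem

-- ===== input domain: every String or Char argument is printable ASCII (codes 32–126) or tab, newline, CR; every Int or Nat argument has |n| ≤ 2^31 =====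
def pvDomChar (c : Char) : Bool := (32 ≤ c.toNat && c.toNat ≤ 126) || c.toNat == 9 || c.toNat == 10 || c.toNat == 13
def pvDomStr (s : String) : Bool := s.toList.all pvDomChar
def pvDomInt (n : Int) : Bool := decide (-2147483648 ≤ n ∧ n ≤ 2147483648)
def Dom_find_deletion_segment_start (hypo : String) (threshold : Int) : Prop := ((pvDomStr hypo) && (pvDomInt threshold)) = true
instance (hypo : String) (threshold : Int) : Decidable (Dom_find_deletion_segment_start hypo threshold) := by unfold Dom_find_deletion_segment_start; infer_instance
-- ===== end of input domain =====

-- B replaces A's manual counter loop by a single regex search for a run of at least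
-- `threshold` asterisks (idiomatic; same O(n) cost, return value identical).

-- ===== PORT A =====
-- A's for-loop over enumerate(hypo) with state (count, start_index); `count += 1`
-- followed by `if count >= threshold` is rendered as `count + 1 ≥ threshold`.
def pvALoop (threshold : Int) : List Char → Nat → Int → Int → Int
  | [], _, _, _ => -1
  | ch :: rest, i, count, start =>
    if ch = '*' then
      let start' := if count = 0 then (i : Int) else start
      if count + 1 ≥ threshold then start'
      else pvALoop threshold rest (i + 1) (count + 1) start'
    else pvALoop threshold rest (i + 1) 0 (-1)

def find_deletion_segment_start (hypo : String) (threshold : Int) : Int :=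
  pvALoop threshold hypo.toList 0 0 (-1)

-- ===== PORT B =====
-- Port of re.search(r'\*{t,}', hypo) with t = max(threshold, 1): leftmost index b
-- whose next t characters are all '*' (exact regex semantics for this pattern);
-- none → -1.  pvHasRun t cs: the next t characters of cs exist and are all '*'.
def pvHasRun : Nat → List Char → Bool
  | 0, _ => true
  | _ + 1, [] => false
  | t + 1, c :: rest => c == '*' && pvHasRun t rest

def pvAltScan (t : Nat) : Nat → List Char → Int
  | _, [] => -1
  | b, c :: rest =>
    if pvHasRun t (c :: rest) then (b : Int)
    else pvAltScan t (b + 1) rest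

def find_deletion_segment_start_alt (hypo : String) (threshold : Int) : Int :=
  pvAltScan (max threshold 1).toNat 0 hypo.toList

-- ===== PRECONDITION & SPEC =====
def Spec_find_deletion_segment_start (hypo : String) (threshold : Int) (out : Int) : Prop := out = find_deletion_segment_start_alt hypo threshold
instance (hypo : String) (threshold : Int) (out : Int) : Decidable (Spec_find_deletion_segment_start hypo threshold out) := by unfold Spec_find_deletion_segment_start; infer_instance

-- ===== CLAIM (what is proved, stated in full; the proofs are below) =====
def Claim_equal_find_deletion_segment_start : Prop := ∀ (hypo : String) (threshold : Int), Dom_find_deletion_segment_start hypo threshold → Spec_find_deletion_segment_start hypo threshold (find_deletion_segment_start hypo threshold)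

-- ===== LEMMAS AND PROOFS =====

-- unfolding equation for A's loop on a cons cell (proof convenience only)
theorem pvALoop_cons (th : Int) (ch : Char) (rest : List Char) (i : Nat) (count start : Int) :
    pvALoop th (ch :: rest) i count start =
      if ch = '*' then
        if count + 1 ≥ th then (if count = 0 then (i : Int) else start)
        else pvALoop th rest (i + 1) (count + 1) (if count = 0 then (i : Int) else start)
      else pvALoop th rest (i + 1) 0 (-1) := by
  by_cases h : ch = '*' <;> simp [pvALoop, h]

theorem pvHasRun_iff (t : Nat) (cs : List Char) :
    pvHasRun t cs = true ↔ cs.take t = List.replicate t '*' := by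
  induction t generalizing cs with
  | zero => simp [pvHasRun]
  | succ t ih =>
    cases cs with
    | nil => simp [pvHasRun, List.replicate_succ]
    | cons c rest => simp [pvHasRun, List.replicate_succ, ih]

-- A's test `count + 1 ≥ threshold` fires on the first star whenever threshold ≤ 1,
-- so A behaves as with threshold clamped to max threshold 1 (count stays ≥ 0).
theorem pvALoop_clamp (threshold : Int) (cs : List Char) :
    ∀ (i : Nat) (count start : Int), 0 ≤ count →
      pvALoop threshold cs i count start = pvALoop (max threshold 1) cs i count start := by
  induction cs with
  | nil => intro i c s _; rfl
  | cons ch rest ih =>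
    intro i c s hc
    rw [pvALoop_cons, pvALoop_cons]
    by_cases hch : ch = '*'
    · have hiff : (c + 1 ≥ threshold) ↔ (c + 1 ≥ max threshold 1) := by
        constructor <;> intro h <;> omega
      rw [if_pos hch, if_pos hch,
        if_congr hiff rfl (ih (i + 1) (c + 1) _ (by omega))]
    · rw [if_neg hch, if_neg hch]
      exact ih (i + 1) 0 (-1) (by omega)

theorem pvAltScan_short (t : Nat) (cs : List Char) :
    ∀ (b : Nat), cs.length < t → pvAltScan t b cs = -1 := by
  induction cs with
  | nil => intro b _; rfl
  | cons c rest ih =>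
    intro b h
    rw [List.length_cons] at h
    have hne : (c :: rest).take t ≠ List.replicate t '*' := by
      intro he
      have : ((c :: rest).take t).length = t := by rw [he, List.length_replicate]
      simp [List.length_take] at this
      omega
    simp only [pvAltScan, if_neg (fun hb => hne ((pvHasRun_iff _ _).mp hb))]
    exact ih (b + 1) (by omega)

-- Scanning over k (< t) stars followed by a non-star just skips k+1 positions.
theorem pvAltScan_skip (t : Nat) (ch : Char) (hch : ch ≠ '*') (rest : List Char) :
    ∀ (k b : Nat), k < t →
      pvAltScan t b (List.replicate k '*' ++ ch :: rest) = pvAltScan t (b + k + 1) rest := by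
  intro k
  induction k with
  | zero =>
    intro b ht
    have hne : (ch :: rest).take t ≠ List.replicate t '*' := by
      intro he
      have hmem : ch ∈ (ch :: rest).take t := by
        cases t with
        | zero => omega
        | succ n => simp [List.take]
      rw [he] at hmem
      exact hch (List.eq_of_mem_replicate hmem)
    simp [pvAltScan, if_neg (fun hb => hne ((pvHasRun_iff _ _).mp hb))]
  | succ k ih =>
    intro b ht
    have hne : ('*' :: (List.replicate k '*' ++ ch :: rest)).take t ≠ List.replicate t '*' := by
      intro he
      have hidx : ('*' :: (List.replicate k '*' ++ ch :: rest))[k + 1]? = some ch := by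
        simp [List.length_replicate]
      have h1 : (('*' :: (List.replicate k '*' ++ ch :: rest)).take t)[k + 1]? = some ch := by
        rw [List.getElem?_take_of_lt ht]; exact hidx
      rw [he, List.getElem?_replicate] at h1
      simp only [ht, if_pos] at h1
      exact hch ((Option.some.injEq _ _).mp h1).symm
    have hstep : List.replicate (k + 1) '*' ++ ch :: rest
        = '*' :: (List.replicate k '*' ++ ch :: rest) := by
      simp [List.replicate_succ]
    rw [hstep]
    simp only [pvAltScan, if_neg (fun hb => hne ((pvHasRun_iff _ _).mp hb))]
    rw [ih (b + 1) (by omega)]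
    congr 1
    omega

-- Main loop invariant: with c (< t) pending stars just before index i (c ≤ i),
-- A's loop on the remaining characters equals B's scan restarted at i - c on
-- those pending stars followed by the rest.
theorem pvMain (t : Nat) (cs : List Char) :
    ∀ (i c : Nat), c < t → c ≤ i →
      pvALoop (t : Int) cs i (c : Int) (if c = 0 then -1 else (i : Int) - (c : Int))
        = pvAltScan t (i - c) (List.replicate c '*' ++ cs) := by
  induction cs with
  | nil =>
    intro i c hct hci
    rw [List.append_nil]
    rw [pvAltScan_short t _ _ (by simp [List.length_replicate]; omega)]
    rfl
  | cons ch rest ih =>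
    intro i c hct hci
    by_cases hch : ch = '*'
    · subst hch
      have hstep : List.replicate c '*' ++ '*' :: rest = List.replicate (c + 1) '*' ++ rest := by
        simp [List.replicate_succ']
      rw [pvALoop_cons, if_pos rfl]
      by_cases hge : (c : Int) + 1 ≥ (t : Int)
      · -- the run reaches the threshold here: c + 1 = t
        have hct1 : c + 1 = t := by omega
        have hx : List.replicate (c + 1) '*' ++ rest = '*' :: (List.replicate c '*' ++ rest) := by
          simp [List.replicate_succ]
        have hmatch : (List.replicate (c + 1) '*' ++ rest).take t = List.replicate t '*' := by
          rw [show t = c + 1 from hct1.symm, List.take_left' (by simp)]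
        rw [if_pos hge, hstep, hx]
        have hmatch' : ('*' :: (List.replicate c '*' ++ rest)).take t = List.replicate t '*' := by
          rw [← hx]; exact hmatch
        simp only [pvAltScan, if_pos ((pvHasRun_iff _ _).mpr hmatch')]
        by_cases h : c = 0
        · simp [h]
        · have hcz : (c : Int) ≠ 0 := by exact_mod_cast h
          rw [if_neg hcz, if_neg h]
          omega
      · -- run continues
        have hct' : c + 1 < t := by omega
        rw [if_neg hge]
        have hstart' : (if (c : Int) = 0 then (i : Int)
            else if c = 0 then (-1 : Int) else (i : Int) - (c : Int)) = (i : Int) - (c : Int) := by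
          by_cases h : c = 0
          · simp [h]
          · have hcz : (c : Int) ≠ 0 := by exact_mod_cast h
            rw [if_neg hcz, if_neg h]
        rw [hstart']
        have h1 := ih (i + 1) (c + 1) hct' (by omega)
        have e1 : i + 1 - (c + 1) = i - c := by omega
        rw [e1, ← hstep, if_neg (Nat.succ_ne_zero c)] at h1
        push_cast at h1
        have e2 : (i : Int) + 1 - ((c : Int) + 1) = (i : Int) - (c : Int) := by ring
        rw [e2] at h1
        exact h1
    · -- non-star: reset
      rw [pvALoop_cons, if_neg hch]
      have h0 := ih (i + 1) 0 (by omega) (by omega)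
      simp only [Nat.cast_zero, Nat.sub_zero, List.replicate_zero, List.nil_append,
        if_true] at h0
      rw [h0, pvAltScan_skip t ch hch rest c (i - c) hct]
      congr 1
      omega

-- ===== VERDICT (by name: the statement is the Claim_ definition above) =====
theorem find_deletion_segment_start_spec : Claim_equal_find_deletion_segment_start := by
  intro hypo threshold _
  unfold Spec_find_deletion_segment_start find_deletion_segment_start find_deletion_segment_start_alt
  rw [pvALoop_clamp threshold hypo.toList 0 0 (-1) le_rfl]
  have ht : ((max threshold 1).toNat : Int) = max threshold 1 := Int.toNat_of_nonneg (by omega)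
  have htpos : 0 < (max threshold 1).toNat := by omega
  have h := pvMain (max threshold 1).toNat hypo.toList 0 0 htpos le_rfl
  simp only [Nat.cast_zero, Nat.sub_zero, List.replicate_zero, List.nil_append,
    if_true] at h
  rw [ht] at h
  exact h
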